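-- pv_equiv track=rewrite | github.com/siyao-zhu/volkova_c_elegans | analyze_volkova_indels.py | regroup_id83_to_14
-- ===== SOURCE A (Python) =====
-- ID83_CATEGORIES = [
--     'DEL.C.1.1','DEL.C.1.2','DEL.C.1.3','DEL.C.1.4','DEL.C.1.5','DEL.C.1.6+',
--     'DEL.T.1.1','DEL.T.1.2','DEL.T.1.3','DEL.T.1.4','DEL.T.1.5','DEL.T.1.6+',
--     'INS.C.1.0','INS.C.1.1','INS.C.1.2','INS.C.1.3','INS.C.1.4','INS.C.1.5+',
--     'INS.T.1.0','INS.T.1.1','INS.T.1.2','INS.T.1.3','INS.T.1.4','INS.T.1.5+',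
--     'DEL.repeats.2.1','DEL.repeats.2.2','DEL.repeats.2.3','DEL.repeats.2.4','DEL.repeats.2.5','DEL.repeats.2.6+',
--     'DEL.repeats.3.1','DEL.repeats.3.2','DEL.repeats.3.3','DEL.repeats.3.4','DEL.repeats.3.5','DEL.repeats.3.6+',
--     'DEL.repeats.4.1','DEL.repeats.4.2','DEL.repeats.4.3','DEL.repeats.4.4','DEL.repeats.4.5','DEL.repeats.4.6+',
--     'DEL.repeats.5+.1','DEL.repeats.5+.2','DEL.repeats.5+.3','DEL.repeats.5+.4','DEL.repeats.5+.5','DEL.repeats.5+.6+',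
--     'INS.repeats.2.0','INS.repeats.2.1','INS.repeats.2.2','INS.repeats.2.3','INS.repeats.2.4','INS.repeats.2.5+',
--     'INS.repeats.3.0','INS.repeats.3.1','INS.repeats.3.2','INS.repeats.3.3','INS.repeats.3.4','INS.repeats.3.5+',
--     'INS.repeats.4.0','INS.repeats.4.1','INS.repeats.4.2','INS.repeats.4.3','INS.repeats.4.4','INS.repeats.4.5+',
--     'INS.repeats.5+.0','INS.repeats.5+.1','INS.repeats.5+.2','INS.repeats.5+.3','INS.repeats.5+.4','INS.repeats.5+.5+',
--     'DEL.MH.2.1','DEL.MH.3.1','DEL.MH.3.2','DEL.MH.4.1','DEL.MH.4.2','DEL.MH.4.3',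
--     'DEL.MH.5+.1','DEL.MH.5+.2','DEL.MH.5+.3','DEL.MH.5+.4','DEL.MH.5+.5+'
-- ]
--
-- def regroup_id83_to_14(id83_signature):
--     """Convert ID83 to ID14 format following the paper's methodology"""
--
--     # Define mapping from ID83 indices to ID14 categories
--     # Note: These are 0-based indices for Python
--     id83_to_id14_mapping = [
--         (list(range(2,6)) + list(range(8,12)), "D.1.rep"),
--         (list(range(0,2)) + list(range(6,8)), "D.1.nonrep"),
--         (list(range(26,30)) + list(range(32,36)) + list(range(38,42)), "D.2.5.rep"),
--         (list(range(24,26)) + list(range(30,32)) + list(range(36,38)) + list(range(72,78)), "D.2.5.nonrep"),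
--         (list(range(42,48)) + list(range(78,83)), "D.5.50"),
--         ([], "D.50.400"),
--         ([], "DI.small"),
--         ([], "DI.large"),
--         (list(range(14,18)) + list(range(20,24)), "I.1.rep"),
--         (list(range(12,14)) + list(range(18,20)), "I.1.nonrep"),
--         (list(range(50,54)) + list(range(56,60)) + list(range(62,66)), "I.2.5.rep"),
--         (list(range(48,50)) + list(range(54,56)) + list(range(60,62)), "I.2.5.nonrep"),
--         (list(range(66,72)), "I.5.50"),
--         ([], "I.50.400")
--     ]
--
--     id14_signature = {}
--
--     # Convert ID83 dict to list for indexing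
--     id83_list = [id83_signature.get(cat, 0) for cat in ID83_CATEGORIES]
--
--     for indices, category in id83_to_id14_mapping:
--         if indices:
--             id14_signature[category] = sum(id83_list[i] for i in indices)
--         else:
--             id14_signature[category] = 0
--
--     return id14_signature
-- ===== SOURCE B (Python) =====
-- # Flat ID83-category -> ID14-group table with a single accumulation pass,
-- # instead of per-group sums over index lists.
--
-- ID14_GROUPS = [
--     'D.1.rep','D.1.nonrep','D.2.5.rep','D.2.5.nonrep','D.5.50','D.50.400','DI.small','DI.large','I.1.rep','I.1.nonrep','I.2.5.rep','I.2.5.nonrep','I.5.50','I.50.400'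
-- ]
--
-- ID83_TO_GROUP = [
--     ('DEL.C.1.1', 'D.1.nonrep'), ('DEL.C.1.2', 'D.1.nonrep'), ('DEL.C.1.3', 'D.1.rep'),
--     ('DEL.C.1.4', 'D.1.rep'), ('DEL.C.1.5', 'D.1.rep'), ('DEL.C.1.6+', 'D.1.rep'),
--     ('DEL.T.1.1', 'D.1.nonrep'), ('DEL.T.1.2', 'D.1.nonrep'), ('DEL.T.1.3', 'D.1.rep'),
--     ('DEL.T.1.4', 'D.1.rep'), ('DEL.T.1.5', 'D.1.rep'), ('DEL.T.1.6+', 'D.1.rep'),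
--     ('INS.C.1.0', 'I.1.nonrep'), ('INS.C.1.1', 'I.1.nonrep'), ('INS.C.1.2', 'I.1.rep'),
--     ('INS.C.1.3', 'I.1.rep'), ('INS.C.1.4', 'I.1.rep'), ('INS.C.1.5+', 'I.1.rep'),
--     ('INS.T.1.0', 'I.1.nonrep'), ('INS.T.1.1', 'I.1.nonrep'), ('INS.T.1.2', 'I.1.rep'),
--     ('INS.T.1.3', 'I.1.rep'), ('INS.T.1.4', 'I.1.rep'), ('INS.T.1.5+', 'I.1.rep'),
--     ('DEL.repeats.2.1', 'D.2.5.nonrep'), ('DEL.repeats.2.2', 'D.2.5.nonrep'), ('DEL.repeats.2.3', 'D.2.5.rep'),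
--     ('DEL.repeats.2.4', 'D.2.5.rep'), ('DEL.repeats.2.5', 'D.2.5.rep'), ('DEL.repeats.2.6+', 'D.2.5.rep'),
--     ('DEL.repeats.3.1', 'D.2.5.nonrep'), ('DEL.repeats.3.2', 'D.2.5.nonrep'), ('DEL.repeats.3.3', 'D.2.5.rep'),
--     ('DEL.repeats.3.4', 'D.2.5.rep'), ('DEL.repeats.3.5', 'D.2.5.rep'), ('DEL.repeats.3.6+', 'D.2.5.rep'),
--     ('DEL.repeats.4.1', 'D.2.5.nonrep'), ('DEL.repeats.4.2', 'D.2.5.nonrep'), ('DEL.repeats.4.3', 'D.2.5.rep'),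
--     ('DEL.repeats.4.4', 'D.2.5.rep'), ('DEL.repeats.4.5', 'D.2.5.rep'), ('DEL.repeats.4.6+', 'D.2.5.rep'),
--     ('DEL.repeats.5+.1', 'D.5.50'), ('DEL.repeats.5+.2', 'D.5.50'), ('DEL.repeats.5+.3', 'D.5.50'),
--     ('DEL.repeats.5+.4', 'D.5.50'), ('DEL.repeats.5+.5', 'D.5.50'), ('DEL.repeats.5+.6+', 'D.5.50'),
--     ('INS.repeats.2.0', 'I.2.5.nonrep'), ('INS.repeats.2.1', 'I.2.5.nonrep'), ('INS.repeats.2.2', 'I.2.5.rep'),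
--     ('INS.repeats.2.3', 'I.2.5.rep'), ('INS.repeats.2.4', 'I.2.5.rep'), ('INS.repeats.2.5+', 'I.2.5.rep'),
--     ('INS.repeats.3.0', 'I.2.5.nonrep'), ('INS.repeats.3.1', 'I.2.5.nonrep'), ('INS.repeats.3.2', 'I.2.5.rep'),
--     ('INS.repeats.3.3', 'I.2.5.rep'), ('INS.repeats.3.4', 'I.2.5.rep'), ('INS.repeats.3.5+', 'I.2.5.rep'),
--     ('INS.repeats.4.0', 'I.2.5.nonrep'), ('INS.repeats.4.1', 'I.2.5.nonrep'), ('INS.repeats.4.2', 'I.2.5.rep'),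
--     ('INS.repeats.4.3', 'I.2.5.rep'), ('INS.repeats.4.4', 'I.2.5.rep'), ('INS.repeats.4.5+', 'I.2.5.rep'),
--     ('INS.repeats.5+.0', 'I.5.50'), ('INS.repeats.5+.1', 'I.5.50'), ('INS.repeats.5+.2', 'I.5.50'),
--     ('INS.repeats.5+.3', 'I.5.50'), ('INS.repeats.5+.4', 'I.5.50'), ('INS.repeats.5+.5+', 'I.5.50'),
--     ('DEL.MH.2.1', 'D.2.5.nonrep'), ('DEL.MH.3.1', 'D.2.5.nonrep'), ('DEL.MH.3.2', 'D.2.5.nonrep'),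
--     ('DEL.MH.4.1', 'D.2.5.nonrep'), ('DEL.MH.4.2', 'D.2.5.nonrep'), ('DEL.MH.4.3', 'D.2.5.nonrep'),
--     ('DEL.MH.5+.1', 'D.5.50'), ('DEL.MH.5+.2', 'D.5.50'), ('DEL.MH.5+.3', 'D.5.50'),
--     ('DEL.MH.5+.4', 'D.5.50'), ('DEL.MH.5+.5+', 'D.5.50')
-- ]
--
--
-- def regroup_id83_to_14(id83_signature):
--     """Convert ID83 to ID14 format following the paper's methodology"""
--     id14_signature = {group: 0 for group in ID14_GROUPS}
--     for cat, group in ID83_TO_GROUP: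
--         id14_signature[group] += id83_signature.get(cat, 0)
--     return id14_signature
-- ===== Notes on version B (the rewrite author's own statement) =====
-- stated objective: idiomatic
-- what changed: Replaces A's per-group inner sums over hard-coded index lists (via an intermediate 83-element value list) with a flat category-to-group lookup table and a single forward accumulation pass into a pre-zeroed 14-group dict.
import Mathlib
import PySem

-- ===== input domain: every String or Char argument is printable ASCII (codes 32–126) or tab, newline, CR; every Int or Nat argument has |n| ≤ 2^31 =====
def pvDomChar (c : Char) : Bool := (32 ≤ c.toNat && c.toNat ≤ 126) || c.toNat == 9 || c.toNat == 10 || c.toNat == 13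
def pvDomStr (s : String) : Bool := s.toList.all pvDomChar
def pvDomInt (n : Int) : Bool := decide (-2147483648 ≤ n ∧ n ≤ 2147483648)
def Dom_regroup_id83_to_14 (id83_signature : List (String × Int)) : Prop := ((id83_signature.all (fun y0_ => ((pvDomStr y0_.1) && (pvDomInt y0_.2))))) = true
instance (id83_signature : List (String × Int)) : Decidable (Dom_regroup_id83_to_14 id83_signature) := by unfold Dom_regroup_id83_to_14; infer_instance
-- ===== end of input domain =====

-- ===== PORT A =====\n-- B replaces A's per-group sums over index lists by one forward pass over a flat
-- category->group table accumulating into a pre-zeroed 14-group dict (idiomatic; same cost).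
def pvID83_CATEGORIES : List String := [
  "DEL.C.1.1", "DEL.C.1.2", "DEL.C.1.3", "DEL.C.1.4", "DEL.C.1.5", "DEL.C.1.6+",
  "DEL.T.1.1", "DEL.T.1.2", "DEL.T.1.3", "DEL.T.1.4", "DEL.T.1.5", "DEL.T.1.6+",
  "INS.C.1.0", "INS.C.1.1", "INS.C.1.2", "INS.C.1.3", "INS.C.1.4", "INS.C.1.5+",
  "INS.T.1.0", "INS.T.1.1", "INS.T.1.2", "INS.T.1.3", "INS.T.1.4", "INS.T.1.5+",
  "DEL.repeats.2.1", "DEL.repeats.2.2", "DEL.repeats.2.3", "DEL.repeats.2.4", "DEL.repeats.2.5", "DEL.repeats.2.6+",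
  "DEL.repeats.3.1", "DEL.repeats.3.2", "DEL.repeats.3.3", "DEL.repeats.3.4", "DEL.repeats.3.5", "DEL.repeats.3.6+",
  "DEL.repeats.4.1", "DEL.repeats.4.2", "DEL.repeats.4.3", "DEL.repeats.4.4", "DEL.repeats.4.5", "DEL.repeats.4.6+",
  "DEL.repeats.5+.1", "DEL.repeats.5+.2", "DEL.repeats.5+.3", "DEL.repeats.5+.4", "DEL.repeats.5+.5", "DEL.repeats.5+.6+",
  "INS.repeats.2.0", "INS.repeats.2.1", "INS.repeats.2.2", "INS.repeats.2.3", "INS.repeats.2.4", "INS.repeats.2.5+",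
  "INS.repeats.3.0", "INS.repeats.3.1", "INS.repeats.3.2", "INS.repeats.3.3", "INS.repeats.3.4", "INS.repeats.3.5+",
  "INS.repeats.4.0", "INS.repeats.4.1", "INS.repeats.4.2", "INS.repeats.4.3", "INS.repeats.4.4", "INS.repeats.4.5+",
  "INS.repeats.5+.0", "INS.repeats.5+.1", "INS.repeats.5+.2", "INS.repeats.5+.3", "INS.repeats.5+.4", "INS.repeats.5+.5+",
  "DEL.MH.2.1", "DEL.MH.3.1", "DEL.MH.3.2", "DEL.MH.4.1", "DEL.MH.4.2", "DEL.MH.4.3",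
  "DEL.MH.5+.1", "DEL.MH.5+.2", "DEL.MH.5+.3", "DEL.MH.5+.4", "DEL.MH.5+.5+"
]

-- A's id83_to_id14_mapping, with the range(...) lists written out (they are constant literals)
def pvID83toID14Mapping : List (List Nat × String) := [
  ([2,3,4,5,8,9,10,11], "D.1.rep"),
  ([0,1,6,7], "D.1.nonrep"),
  ([26,27,28,29,32,33,34,35,38,39,40,41], "D.2.5.rep"),
  ([24,25,30,31,36,37,72,73,74,75,76,77], "D.2.5.nonrep"),
  ([42,43,44,45,46,47,78,79,80,81,82], "D.5.50"),
  ([], "D.50.400"),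
  ([], "DI.small"),
  ([], "DI.large"),
  ([14,15,16,17,20,21,22,23], "I.1.rep"),
  ([12,13,18,19], "I.1.nonrep"),
  ([50,51,52,53,56,57,58,59,62,63,64,65], "I.2.5.rep"),
  ([48,49,54,55,60,61], "I.2.5.nonrep"),
  ([66,67,68,69,70,71], "I.5.50"),
  ([], "I.50.400")
]

-- Port of A. id83_signature.get(cat, 0) -> Dict.getD; id83_list[i] -> getD i 0 (exact: every
-- index in the mapping is < 83 = id83_list.length, so Python never raises here);
-- sum(generator) -> foldl (+) 0; the returned dict's items are the association list.
def regroup_id83_to_14 (id83_signature : List (String × Int)) : List (String × Int) :=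
  let d := PySem.Dict.mk id83_signature
  let id83_list := pvID83_CATEGORIES.map (fun cat => d.getD cat 0)
  (pvID83toID14Mapping.foldl (fun acc p =>
      if p.1.isEmpty then acc.insert p.2 0
      else acc.insert p.2 (p.1.foldl (fun s i => s + id83_list.getD i 0) 0))
    PySem.Dict.empty).items

-- ===== PORT B =====
def pvID14_GROUPS : List String := ["D.1.rep", "D.1.nonrep", "D.2.5.rep", "D.2.5.nonrep", "D.5.50", "D.50.400", "DI.small", "DI.large", "I.1.rep", "I.1.nonrep", "I.2.5.rep", "I.2.5.nonrep", "I.5.50", "I.50.400"]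

def pvID83_TO_GROUP : List (String × String) := [
  ("DEL.C.1.1", "D.1.nonrep"), ("DEL.C.1.2", "D.1.nonrep"), ("DEL.C.1.3", "D.1.rep"),
  ("DEL.C.1.4", "D.1.rep"), ("DEL.C.1.5", "D.1.rep"), ("DEL.C.1.6+", "D.1.rep"),
  ("DEL.T.1.1", "D.1.nonrep"), ("DEL.T.1.2", "D.1.nonrep"), ("DEL.T.1.3", "D.1.rep"),
  ("DEL.T.1.4", "D.1.rep"), ("DEL.T.1.5", "D.1.rep"), ("DEL.T.1.6+", "D.1.rep"),
  ("INS.C.1.0", "I.1.nonrep"), ("INS.C.1.1", "I.1.nonrep"), ("INS.C.1.2", "I.1.rep"),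
  ("INS.C.1.3", "I.1.rep"), ("INS.C.1.4", "I.1.rep"), ("INS.C.1.5+", "I.1.rep"),
  ("INS.T.1.0", "I.1.nonrep"), ("INS.T.1.1", "I.1.nonrep"), ("INS.T.1.2", "I.1.rep"),
  ("INS.T.1.3", "I.1.rep"), ("INS.T.1.4", "I.1.rep"), ("INS.T.1.5+", "I.1.rep"),
  ("DEL.repeats.2.1", "D.2.5.nonrep"), ("DEL.repeats.2.2", "D.2.5.nonrep"), ("DEL.repeats.2.3", "D.2.5.rep"),
  ("DEL.repeats.2.4", "D.2.5.rep"), ("DEL.repeats.2.5", "D.2.5.rep"), ("DEL.repeats.2.6+", "D.2.5.rep"),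
  ("DEL.repeats.3.1", "D.2.5.nonrep"), ("DEL.repeats.3.2", "D.2.5.nonrep"), ("DEL.repeats.3.3", "D.2.5.rep"),
  ("DEL.repeats.3.4", "D.2.5.rep"), ("DEL.repeats.3.5", "D.2.5.rep"), ("DEL.repeats.3.6+", "D.2.5.rep"),
  ("DEL.repeats.4.1", "D.2.5.nonrep"), ("DEL.repeats.4.2", "D.2.5.nonrep"), ("DEL.repeats.4.3", "D.2.5.rep"),
  ("DEL.repeats.4.4", "D.2.5.rep"), ("DEL.repeats.4.5", "D.2.5.rep"), ("DEL.repeats.4.6+", "D.2.5.rep"),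
  ("DEL.repeats.5+.1", "D.5.50"), ("DEL.repeats.5+.2", "D.5.50"), ("DEL.repeats.5+.3", "D.5.50"),
  ("DEL.repeats.5+.4", "D.5.50"), ("DEL.repeats.5+.5", "D.5.50"), ("DEL.repeats.5+.6+", "D.5.50"),
  ("INS.repeats.2.0", "I.2.5.nonrep"), ("INS.repeats.2.1", "I.2.5.nonrep"), ("INS.repeats.2.2", "I.2.5.rep"),
  ("INS.repeats.2.3", "I.2.5.rep"), ("INS.repeats.2.4", "I.2.5.rep"), ("INS.repeats.2.5+", "I.2.5.rep"),
  ("INS.repeats.3.0", "I.2.5.nonrep"), ("INS.repeats.3.1", "I.2.5.nonrep"), ("INS.repeats.3.2", "I.2.5.rep"),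
  ("INS.repeats.3.3", "I.2.5.rep"), ("INS.repeats.3.4", "I.2.5.rep"), ("INS.repeats.3.5+", "I.2.5.rep"),
  ("INS.repeats.4.0", "I.2.5.nonrep"), ("INS.repeats.4.1", "I.2.5.nonrep"), ("INS.repeats.4.2", "I.2.5.rep"),
  ("INS.repeats.4.3", "I.2.5.rep"), ("INS.repeats.4.4", "I.2.5.rep"), ("INS.repeats.4.5+", "I.2.5.rep"),
  ("INS.repeats.5+.0", "I.5.50"), ("INS.repeats.5+.1", "I.5.50"), ("INS.repeats.5+.2", "I.5.50"),
  ("INS.repeats.5+.3", "I.5.50"), ("INS.repeats.5+.4", "I.5.50"), ("INS.repeats.5+.5+", "I.5.50"),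
  ("DEL.MH.2.1", "D.2.5.nonrep"), ("DEL.MH.3.1", "D.2.5.nonrep"), ("DEL.MH.3.2", "D.2.5.nonrep"),
  ("DEL.MH.4.1", "D.2.5.nonrep"), ("DEL.MH.4.2", "D.2.5.nonrep"), ("DEL.MH.4.3", "D.2.5.nonrep"),
  ("DEL.MH.5+.1", "D.5.50"), ("DEL.MH.5+.2", "D.5.50"), ("DEL.MH.5+.3", "D.5.50"),
  ("DEL.MH.5+.4", "D.5.50"), ("DEL.MH.5+.5+", "D.5.50")
]

-- Port of B. {group: 0 for ...} -> foldl insert; id14_signature[group] += v ->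
-- Dict.modify group 0 (. + v) (exact: every group key is present in the pre-zeroed dict).
def regroup_id83_to_14_alt (id83_signature : List (String × Int)) : List (String × Int) :=
  let d := PySem.Dict.mk id83_signature
  let init := pvID14_GROUPS.foldl (fun acc g => acc.insert g (0 : Int)) PySem.Dict.empty
  (pvID83_TO_GROUP.foldl (fun acc p => acc.modify p.2 0 (· + d.getD p.1 0)) init).items


-- ===== PRECONDITION & SPEC =====
def Spec_regroup_id83_to_14 (id83_signature : List (String × Int)) (out : List (String × Int)) : Prop := out = regroup_id83_to_14_alt id83_signature
instance (id83_signature : List (String × Int)) (out : List (String × Int)) : Decidable (Spec_regroup_id83_to_14 id83_signature out) := by unfold Spec_regroup_id83_to_14; infer_instance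

-- ===== CLAIM (what is proved, stated in full; the proofs are below) =====
def Claim_equal_regroup_id83_to_14 : Prop := ∀ (id83_signature : List (String × Int)), Dom_regroup_id83_to_14 id83_signature → Spec_regroup_id83_to_14 id83_signature (regroup_id83_to_14 id83_signature)

-- ===== LEMMAS AND PROOFS =====

-- ===== VERDICT (by name: the statement is the Claim_ definition above) =====
set_option maxHeartbeats 1000000 in
theorem regroup_id83_to_14_spec : Claim_equal_regroup_id83_to_14 := by
  intro id83_signature _
  unfold Spec_regroup_id83_to_14 regroup_id83_to_14 regroup_id83_to_14_alt
  simp [pvID83_CATEGORIES, pvID83toID14Mapping, pvID14_GROUPS, pvID83_TO_GROUP,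
        PySem.Dict.insert, PySem.Dict.modify, PySem.Dict.empty,
        PySem.Dict.getD, PySem.Dict.get?, List.getD]
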